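-- pv_equiv track=rewrite | github.com/darzgood/birdquiz2 | app/DataHandler.py | check
-- ===== SOURCE A (Python) =====
-- def check(str1, str2, variance = 1):
--     x = 0
--     for let in str1:
--         if let not in str2:
--             x += 1
--     if x > variance:
--         return False
--     return True
-- ===== SOURCE B (Python) =====
-- def check(str1, str2, variance = 1):
--     freq = {}
--     for c in str1:
--         freq[c] = freq.get(c, 0) + 1
--     x = sum(n for c, n in freq.items() if c not in str2)
--     return x <= variance
-- ===== Notes on version B (the rewrite author's own statement) =====
-- stated objective: alternative
-- what changed: B builds a frequency dict of str1 once and sums the multiplicities of the distinct characters absent from str2, instead of testing membership per occurrence and branching on the count.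
import Mathlib
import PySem

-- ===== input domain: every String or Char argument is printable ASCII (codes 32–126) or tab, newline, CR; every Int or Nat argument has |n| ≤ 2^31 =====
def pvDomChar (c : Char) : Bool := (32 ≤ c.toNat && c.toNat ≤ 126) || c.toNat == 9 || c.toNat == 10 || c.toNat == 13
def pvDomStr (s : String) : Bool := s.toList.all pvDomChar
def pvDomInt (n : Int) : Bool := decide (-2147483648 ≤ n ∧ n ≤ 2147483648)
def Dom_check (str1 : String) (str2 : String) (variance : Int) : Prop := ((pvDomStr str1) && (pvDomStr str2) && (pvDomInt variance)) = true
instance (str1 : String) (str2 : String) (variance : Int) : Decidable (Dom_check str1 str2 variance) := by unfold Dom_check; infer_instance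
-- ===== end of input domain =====

-- B counts via a frequency dict over distinct characters instead of per-occurrence membership tests (objective: alternative).

-- ===== PORT A =====
-- 'let not in str2' for a single character is exactly list membership of that char.
def check (str1 : String) (str2 : String) (variance : Int) : Bool :=
  let x : Int := str1.toList.foldl
    (fun x c => if !(str2.toList.contains c) then x + 1 else x) 0
  if x > variance then false else true

-- ===== PORT B =====
def check_alt (str1 : String) (str2 : String) (variance : Int) : Bool :=
  let freq : PySem.Dict Char Int := str1.toList.foldl
    (fun d c => d.insert c (d.getD c 0 + 1)) PySem.Dict.empty
  -- sum(n for c, n in freq.items() if c not in str2)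
  let x : Int := ((freq.items.filter (fun p => !(str2.toList.contains p.1))).map
    (fun p => p.2)).sum
  decide (x ≤ variance)

-- ===== PRECONDITION & SPEC =====
def Spec_check (str1 : String) (str2 : String) (variance : Int) (out : Bool) : Prop := out = check_alt str1 str2 variance
instance (str1 : String) (str2 : String) (variance : Int) (out : Bool) : Decidable (Spec_check str1 str2 variance out) := by unfold Spec_check; infer_instance

-- ===== CLAIM (what is proved, stated in full; the proofs are below) =====
def Claim_equal_check : Prop := ∀ (str1 : String) (str2 : String) (variance : Int), Dom_check str1 str2 variance → Spec_check str1 str2 variance (check str1 str2 variance)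

-- ===== LEMMAS AND PROOFS =====

-- A's loop is a countP.
theorem foldl_if_count (p : Char → Bool) (l : List Char) (a : Int) :
    l.foldl (fun x c => if p c then x + 1 else x) a = a + (l.countP p : Int) := by
  induction l generalizing a with
  | nil => simp
  | cons c l ih =>
    simp only [List.foldl_cons, List.countP_cons, ih]
    by_cases h : p c = true
    · simp [h]; push_cast; ring
    · simp [h]

-- A 0/1 equality-indicator sum is a count.
theorem sum_map_ite_eq (a : Char) (s : List Char) :
    (s.map (fun k => (if k = a then (1 : Int) else 0))).sum = (s.count a : Int) := by
  induction s with
  | nil => simp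
  | cons b s ih =>
    simp only [List.map_cons, List.sum_cons, ih, List.count_cons]
    by_cases hb : b = a
    · subst hb; simp; ring
    · rw [if_neg hb, if_neg (by simp [hb])]; simp

-- Summing per-distinct-char counts over a nodup cover equals countP.
theorem sum_counts_eq_countP (p : Char → Bool) (s l : List Char) (hs : s.Nodup)
    (h : ∀ a ∈ l, p a = true → a ∈ s) :
    ((s.filter p).map (fun k => (l.count k : Int))).sum = (l.countP p : Int) := by
  induction l with
  | nil => simp
  | cons a l ih =>
    have hsub : ∀ b ∈ l, p b = true → b ∈ s := fun b hb => h b (List.mem_cons_of_mem _ hb)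
    have key : ((s.filter p).map (fun k => ((a :: l).count k : Int))).sum
        = ((s.filter p).map (fun k => (l.count k : Int))).sum
          + ((s.filter p).map (fun k => (if k = a then (1 : Int) else 0))).sum := by
      rw [← PySem.List.sum_map_add_int]
      congr 1
      apply List.map_congr_left
      intro k _
      simp [List.count_cons]
      by_cases hk : k = a
      · simp [hk]
      · simp [hk, Ne.symm hk]
    rw [key, ih hsub]
    have h2 : ((s.filter p).map (fun k => (if k = a then (1 : Int) else 0))).sum
        = if p a then (1 : Int) else 0 := by
      rw [sum_map_ite_eq]
      by_cases hpa : p a = true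
      · have hmem : a ∈ s.filter p := List.mem_filter.mpr ⟨h a (List.mem_cons_self) hpa, hpa⟩
        have hcnt : (s.filter p).count a = 1 :=
          List.count_eq_one_of_mem (hs.filter p) hmem
        simp [hcnt, hpa]
      · have hmem : a ∉ s.filter p := fun hm => hpa (List.mem_filter.mp hm).2
        have hcnt : (s.filter p).count a = 0 := List.count_eq_zero.mpr hmem
        simp [hcnt, hpa]
    rw [h2]
    rw [List.countP_cons]
    by_cases hpa : p a = true
    · simp [hpa]
    · simp [hpa]

-- ===== VERDICT (by name: the statement is the Claim_ definition above) =====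
theorem check_spec : Claim_equal_check := by
  intro str1 str2 variance _
  unfold Spec_check check check_alt
  show (if str1.toList.foldl (fun x c => if !(str2.toList.contains c) then x + 1 else x) 0 > variance
        then false else true)
      = decide ((((PySem.Dict.counter str1.toList).items.filter
          (fun p => !(str2.toList.contains p.1))).map (fun p => p.2)).sum ≤ variance)
  rw [PySem.Dict.items_counter]
  set p : Char → Bool := fun c => !(str2.toList.contains c) with hp
  have hfilter : ((PySem.Set.ofList str1.toList).map
        (fun k => (k, (str1.toList.count k : Int)))).filter (fun q => p q.1)
      = ((PySem.Set.ofList str1.toList).filter p).map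
        (fun k => (k, (str1.toList.count k : Int))) := by
    rw [List.filter_map]; rfl
  rw [hfilter, List.map_map]
  have hsum : (((PySem.Set.ofList str1.toList).filter p).map
      ((fun q : Char × Int => q.2) ∘ (fun k => (k, (str1.toList.count k : Int))))).sum
      = (str1.toList.countP p : Int) := by
    have := sum_counts_eq_countP p (PySem.Set.ofList str1.toList) str1.toList
      (PySem.Set.nodup_ofList _)
      (fun a ha _ => (PySem.Set.mem_ofList _ _).mpr ha)
    simpa using this
  rw [hsum, foldl_if_count p str1.toList 0]
  simp only [zero_add]
  by_cases h : (str1.toList.countP p : Int) > variance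
  all_goals simp [h]
  all_goals omega
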